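-- pv_equiv track=rewrite | github.com/blindcat-10835/ComputerProblemsSolution | ComputerProblemsSolution/gobang.py | game_win
-- ===== SOURCE A (Python) =====
-- COLUMN = 15
--
-- ROW = 15
--
-- def game_win(List):
--     '''
--     传入的list判断当前list是否已经连出五子
--     :param list:需要判断的棋子列表
--     :return: True or False
--     '''
--     for m in range(COLUMN):
--         for n in range(ROW):
--
--             if (n < ROW - 4
--                     and (m, n) in List
--                     and (m, n + 1) in List
--                     and (m, n + 2) in List
--                     and (m, n + 3) in List
--                     and (m, n + 4) in List):
--                 return True
--             elif (m < ROW - 4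
--                     and (m, n) in List
--                     and (m + 1, n) in List
--                     and (m + 2, n) in List
--                     and (m + 3, n) in List
--                     and (m + 4, n) in List):
--                 return True
--             elif (m < ROW - 4
--                     and n < ROW - 4
--                     and (m, n) in List
--                     and (m + 1, n + 1) in List
--                     and (m + 2, n + 2) in List
--                     and (m + 3, n + 3) in List
--                     and (m + 4, n + 4) in List):
--                 return True
--             elif (m < ROW - 4
--                     and n > 3
--                     and (m, n) in List
--                     and (m + 1, n - 1) in List
--                     and (m + 2, n - 2) in List
--                     and (m + 3, n - 3) in List
--                     and (m + 4, n - 4) in List):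
--                 return True
--     return False
-- ===== SOURCE B (Python) =====
-- def game_win(List):
--     '''
--     传入的list判断当前list是否已经连出五子
--     :param list:需要判断的棋子列表
--     :return: True or False
--     '''
--     stones = set(List)
--     for (m, n) in stones:
--         for dx, dy in ((0, 1), (1, 0), (1, 1), (1, -1)):
--             if all(0 <= m + k * dx <= 14
--                    and 0 <= n + k * dy <= 14
--                    and (m + k * dx, n + k * dy) in stones
--                    for k in range(5)):
--                 return True
--     return False
-- ===== Notes on version B (the rewrite author's own statement) =====
-- stated objective: faster
-- what changed: Instead of scanning all 225 board cells with O(|List|) list membership tests, B builds a hash set once and iterates only over the placed stones, checking the four direction runs with O(1) set lookups and explicit 0..14 bounds.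
import Mathlib
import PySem

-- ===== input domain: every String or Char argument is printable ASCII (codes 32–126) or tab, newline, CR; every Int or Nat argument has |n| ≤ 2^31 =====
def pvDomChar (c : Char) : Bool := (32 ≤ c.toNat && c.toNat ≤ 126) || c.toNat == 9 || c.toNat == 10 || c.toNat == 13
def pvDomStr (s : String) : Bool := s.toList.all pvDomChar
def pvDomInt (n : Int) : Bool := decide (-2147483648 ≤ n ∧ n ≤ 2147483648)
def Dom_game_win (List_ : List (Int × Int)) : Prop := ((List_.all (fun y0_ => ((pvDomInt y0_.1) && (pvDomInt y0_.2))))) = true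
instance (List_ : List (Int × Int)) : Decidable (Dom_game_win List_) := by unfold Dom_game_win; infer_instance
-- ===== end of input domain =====

-- B changes the traversal: instead of scanning all 225 board cells, it iterates over the placed
-- stones (as a set) and checks the four direction runs with membership lookups (objective: faster).

-- ===== PORT A =====
-- literal port: 'for m in range(15): for n in range(15): if <4-way elif chain>: return True; return False'
def game_win (List_ : List (Int × Int)) : Bool :=
  (PySem.List.pyRange 0 15 1).any (fun m =>
    (PySem.List.pyRange 0 15 1).any (fun n =>
      (decide (n < 15 - 4) && List_.contains (m, n) && List_.contains (m, n + 1) &&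
        List_.contains (m, n + 2) && List_.contains (m, n + 3) && List_.contains (m, n + 4)) ||
      (decide (m < 15 - 4) && List_.contains (m, n) && List_.contains (m + 1, n) &&
        List_.contains (m + 2, n) && List_.contains (m + 3, n) && List_.contains (m + 4, n)) ||
      (decide (m < 15 - 4) && decide (n < 15 - 4) && List_.contains (m, n) && List_.contains (m + 1, n + 1) &&
        List_.contains (m + 2, n + 2) && List_.contains (m + 3, n + 3) && List_.contains (m + 4, n + 4)) ||
      (decide (m < 15 - 4) && decide (n > 3) && List_.contains (m, n) && List_.contains (m + 1, n - 1) &&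
        List_.contains (m + 2, n - 2) && List_.contains (m + 3, n - 3) && List_.contains (m + 4, n - 4))))

-- ===== PORT B =====
-- literal port of Source B: stones = set(List); for (m,n) in stones: for d in dirs: if all(... for k in range(5)) ...
def game_win_alt (List_ : List (Int × Int)) : Bool :=
  let stones := PySem.Set.ofList List_
  stones.any (fun p =>
    [((0 : Int), (1 : Int)), (1, 0), (1, 1), (1, -1)].any (fun d =>
      (PySem.List.pyRange 0 5 1).all (fun k =>
        decide (0 ≤ p.1 + k * d.1) && decide (p.1 + k * d.1 ≤ 14) &&
        decide (0 ≤ p.2 + k * d.2) && decide (p.2 + k * d.2 ≤ 14) &&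
        stones.contains (p.1 + k * d.1, p.2 + k * d.2))))

-- ===== PRECONDITION & SPEC =====
def Spec_game_win (List_ : List (Int × Int)) (out : Bool) : Prop := out = game_win_alt List_
instance (List_ : List (Int × Int)) (out : Bool) : Decidable (Spec_game_win List_ out) := by unfold Spec_game_win; infer_instance

-- ===== CLAIM (what is proved, stated in full; the proofs are below) =====
def Claim_equal_game_win : Prop := ∀ (List_ : List (Int × Int)), Dom_game_win List_ → Spec_game_win List_ (game_win List_)

-- ===== LEMMAS AND PROOFS =====

theorem game_win_eq_alt (L : List (Int × Int)) : game_win L = game_win_alt L := by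
  have hA : game_win L = true ↔
      ∃ m : Int, 0 ≤ m ∧ m < 15 ∧ ∃ n : Int, 0 ≤ n ∧ n < 15 ∧
        (((n < 11 ∧ (m, n) ∈ L ∧ (m, n + 1) ∈ L ∧ (m, n + 2) ∈ L ∧ (m, n + 3) ∈ L ∧ (m, n + 4) ∈ L ∨
           m < 11 ∧ (m, n) ∈ L ∧ (m + 1, n) ∈ L ∧ (m + 2, n) ∈ L ∧ (m + 3, n) ∈ L ∧ (m + 4, n) ∈ L) ∨
          m < 11 ∧ n < 11 ∧ (m, n) ∈ L ∧ (m + 1, n + 1) ∈ L ∧ (m + 2, n + 2) ∈ L ∧ (m + 3, n + 3) ∈ L ∧ (m + 4, n + 4) ∈ L) ∨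
         m < 11 ∧ 3 < n ∧ (m, n) ∈ L ∧ (m + 1, n - 1) ∈ L ∧ (m + 2, n - 2) ∈ L ∧ (m + 3, n - 3) ∈ L ∧ (m + 4, n - 4) ∈ L) := by
    simp [game_win, List.any_eq_true, PySem.List.mem_pyRange_one, and_assoc]
  have hB : game_win_alt L = true ↔
      ∃ p ∈ L, ∃ d ∈ [((0 : Int), (1 : Int)), (1, 0), (1, 1), (1, -1)],
        ∀ k : Int, 0 ≤ k → k < 5 →
          (0 ≤ p.1 + k * d.1 ∧ p.1 + k * d.1 ≤ 14 ∧ 0 ≤ p.2 + k * d.2 ∧ p.2 + k * d.2 ≤ 14 ∧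
           (p.1 + k * d.1, p.2 + k * d.2) ∈ L) := by
    simp only [game_win_alt, List.any_eq_true, List.all_eq_true, PySem.Set.mem_ofList,
      PySem.List.mem_pyRange_one, List.contains_iff_mem, Bool.and_eq_true, decide_eq_true_eq,
      and_imp, and_assoc]
    constructor
    · rintro ⟨p, hp, d, hd, h⟩
      refine ⟨p, hp, d, hd, fun k hk0 hk5 => ?_⟩
      have := h k hk0 hk5
      simpa [PySem.Set.mem_ofList, List.contains_iff_mem] using this
    · rintro ⟨p, hp, d, hd, h⟩
      refine ⟨p, hp, d, hd, fun k hk0 hk5 => ?_⟩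
      have := h k hk0 hk5
      simpa [PySem.Set.mem_ofList, List.contains_iff_mem] using this
  rw [Bool.eq_iff_iff, hA, hB]
  constructor
  · rintro ⟨m, hm0, hm15, n, hn0, hn15, hpat⟩
    rcases hpat with ((⟨h, h0, h1, h2, h3, h4⟩ | ⟨h, h0, h1, h2, h3, h4⟩) |
      ⟨h, h', h0, h1, h2, h3, h4⟩) | ⟨h, h', h0, h1, h2, h3, h4⟩
    · refine ⟨(m, n), h0, ((0 : Int), (1 : Int)), by simp, fun k hk0 hk5 => ?_⟩
      have hk : k = 0 ∨ k = 1 ∨ k = 2 ∨ k = 3 ∨ k = 4 := by omega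
      rcases hk with rfl | rfl | rfl | rfl | rfl <;>
        exact ⟨by omega, by omega, by omega, by omega, by norm_num; assumption⟩
    · refine ⟨(m, n), h0, ((1 : Int), (0 : Int)), by simp, fun k hk0 hk5 => ?_⟩
      have hk : k = 0 ∨ k = 1 ∨ k = 2 ∨ k = 3 ∨ k = 4 := by omega
      rcases hk with rfl | rfl | rfl | rfl | rfl <;>
        exact ⟨by omega, by omega, by omega, by omega, by norm_num; assumption⟩
    · refine ⟨(m, n), h0, ((1 : Int), (1 : Int)), by simp, fun k hk0 hk5 => ?_⟩
      have hk : k = 0 ∨ k = 1 ∨ k = 2 ∨ k = 3 ∨ k = 4 := by omega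
      rcases hk with rfl | rfl | rfl | rfl | rfl <;>
        exact ⟨by omega, by omega, by omega, by omega, by norm_num; assumption⟩
    · refine ⟨(m, n), h0, ((1 : Int), (-1 : Int)), by simp, fun k hk0 hk5 => ?_⟩
      have hk : k = 0 ∨ k = 1 ∨ k = 2 ∨ k = 3 ∨ k = 4 := by omega
      rcases hk with rfl | rfl | rfl | rfl | rfl <;>
        exact ⟨by omega, by omega, by omega, by omega, by norm_num; assumption⟩
  · rintro ⟨⟨m, n⟩, hmem, d, hd, hall⟩
    have h0 := hall 0 (by norm_num) (by norm_num)
    have h1 := hall 1 (by norm_num) (by norm_num)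
    have h2 := hall 2 (by norm_num) (by norm_num)
    have h3 := hall 3 (by norm_num) (by norm_num)
    have h4 := hall 4 (by norm_num) (by norm_num)
    clear hall
    simp only [List.mem_cons, List.not_mem_nil, or_false] at hd
    have hpair : ∀ x y : Int × Int, x = y → x ∈ L → y ∈ L := by rintro x y rfl hx; exact hx
    rcases hd with rfl | rfl | rfl | rfl <;>
      norm_num at h0 h1 h2 h3 h4 <;>
      obtain ⟨a0, b0, c0, d0, e0⟩ := h0 <;>
      obtain ⟨a1, b1, c1, d1, e1⟩ := h1 <;>
      obtain ⟨a2, b2, c2, d2, e2⟩ := h2 <;>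
      obtain ⟨a3, b3, c3, d3, e3⟩ := h3 <;>
      obtain ⟨a4, b4, c4, d4, e4⟩ := h4
    · exact ⟨m, by omega, by omega, n, by omega, by omega,
        Or.inl (Or.inl (Or.inl ⟨by omega, e0, e1, e2, e3, e4⟩))⟩
    · exact ⟨m, by omega, by omega, n, by omega, by omega,
        Or.inl (Or.inl (Or.inr ⟨by omega, e0, e1, e2, e3, e4⟩))⟩
    · exact ⟨m, by omega, by omega, n, by omega, by omega,
        Or.inl (Or.inr ⟨by omega, by omega, e0, e1, e2, e3, e4⟩)⟩
    · exact ⟨m, by omega, by omega, n, by omega, by omega,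
        Or.inr ⟨by omega, by omega, e0,
          hpair _ _ (by norm_num <;> ring) e1, hpair _ _ (by norm_num <;> ring) e2,
          hpair _ _ (by norm_num <;> ring) e3, hpair _ _ (by norm_num <;> ring) e4⟩⟩

-- ===== VERDICT (by name: the statement is the Claim_ definition above) =====
theorem game_win_spec : Claim_equal_game_win := by
  intro L _
  exact game_win_eq_alt L
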